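-- pv_equiv track=rewrite | github.com/VikramAIS/ora-to-pg | migrate_views_recursive.py | _find_statement_end
-- ===== SOURCE A (Python) =====
-- def _find_statement_end(text: str, start: int) -> int:
--     """
--     Find the end of the current SQL statement (next semicolon at top level).
--     Ignores semicolons inside parentheses, single-quoted strings, and comments (-- and /* */).
--     Returns index of the semicolon, or len(text) if not found.
--     """
--     depth = 0
--     i = start
--     in_single = False
--     in_line_comment = False
--     in_block_comment = False
--     while i < len(text):
--         c = text[i]
--         if in_line_comment:
--             if c == "\n":
--                 in_line_comment = False
--             i += 1
--             continue
--         if in_block_comment: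
--             if c == "*" and i + 1 < len(text) and text[i + 1] == "/":
--                 in_block_comment = False
--                 i += 2
--             else:
--                 i += 1
--             continue
--         if in_single:
--             if c == "'" and (i + 1 >= len(text) or text[i + 1] != "'"):
--                 in_single = False
--             elif c == "'" and i + 1 < len(text) and text[i + 1] == "'":
--                 i += 1
--             i += 1
--             continue
--         if c == "'":
--             in_single = True
--             i += 1
--             continue
--         if c == "-" and i + 1 < len(text) and text[i + 1] == "-":
--             in_line_comment = True
--             i += 2
--             continue
--         if c == "/" and i + 1 < len(text) and text[i + 1] == "*":
--             in_block_comment = True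
--             i += 2
--             continue
--         if c == "(":
--             depth += 1
--             i += 1
--             continue
--         if c == ")":
--             depth -= 1
--             i += 1
--             continue
--         if c == ";" and depth == 0:
--             return i
--         i += 1
--     return len(text)
-- ===== SOURCE B (Python) =====
-- import re
--
-- # One regex token per construct: a single-quoted string (with '' doubling; an
-- # unterminated one runs to end-of-text), a -- line comment (with its newline),
-- # a /* */ block comment (or an unterminated one running to end-of-text), the
-- # three significant punctuation characters, or any other single character.
-- _TOKEN = re.compile(r"'(?:''|[^'])*'?|--[^\n]*\n?|/\*.*?\*/|/\*.*|[();]|.", re.DOTALL)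
--
--
-- def _find_statement_end(text: str, start: int) -> int:
--     depth = 0
--     for m in _TOKEN.finditer(text, start):
--         tok = m.group()
--         if tok == "(":
--             depth += 1
--         elif tok == ")":
--             depth -= 1
--         elif tok == ";" and depth == 0:
--             return m.start()
--     return len(text)
-- ===== Notes on version B (the rewrite author's own statement) =====
-- stated objective: idiomatic
-- what changed: Replaced the per-character boolean-flag state machine with a one-pass regex tokenizer that consumes each string/comment/other construct as a single token and keeps only a paren-depth counter.
-- outside the precondition, e.g. on _find_statement_end('a;b', -2): A returns -2, B returns 1; on _find_statement_end('a;b', -9): A raises IndexError, B returns 1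
import Mathlib
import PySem

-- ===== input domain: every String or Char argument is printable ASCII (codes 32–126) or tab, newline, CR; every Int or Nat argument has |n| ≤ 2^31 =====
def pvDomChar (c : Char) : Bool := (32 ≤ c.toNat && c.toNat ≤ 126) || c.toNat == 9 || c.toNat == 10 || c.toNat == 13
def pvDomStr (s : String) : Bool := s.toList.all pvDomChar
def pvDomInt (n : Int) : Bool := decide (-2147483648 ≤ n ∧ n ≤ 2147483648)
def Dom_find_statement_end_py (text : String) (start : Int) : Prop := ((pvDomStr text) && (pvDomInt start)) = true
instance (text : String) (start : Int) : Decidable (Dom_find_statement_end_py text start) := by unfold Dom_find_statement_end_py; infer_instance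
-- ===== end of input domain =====

-- B replaces A's per-character boolean-flag state machine by a regex-style tokenizer that
-- consumes each string/comment as one token and keeps only a paren-depth counter (idiomatic).

-- ===== PORT A =====
-- literal transliteration of A's while-loop; i is an Int and indexing uses pyGet?
-- (Python's negative-index wraparound); pyGet? = none is where Python raises IndexError
-- (start < -len(text)), outside Pre_ — the port returns 0 there.  fuel is only a
-- totality guard: it always exceeds the remaining iteration count, so fuel = 0 is never hit.
def aLoop (cs : List Char) (depth : Int) (i : Int) (inS inL inB : Bool) : Nat → Int
  | 0 => (cs.length : Int)
  | fuel+1 =>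
    if i < (cs.length : Int) then
      match PySem.List.pyGet? cs i with
      | none => 0
      | some c =>
        if inL then
          if c = '\n' then aLoop cs depth (i+1) inS false inB fuel
          else aLoop cs depth (i+1) inS inL inB fuel
        else if inB then
          if c = '*' ∧ i + 1 < (cs.length : Int) ∧ PySem.List.pyGet? cs (i+1) = some '/' then
            aLoop cs depth (i+2) inS inL false fuel
          else aLoop cs depth (i+1) inS inL inB fuel
        else if inS then
          if c = '\'' ∧ (¬ i + 1 < (cs.length : Int) ∨ PySem.List.pyGet? cs (i+1) ≠ some '\'') then
            aLoop cs depth (i+1) false inL inB fuel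
          else if c = '\'' ∧ i + 1 < (cs.length : Int) ∧ PySem.List.pyGet? cs (i+1) = some '\'' then
            aLoop cs depth (i+2) inS inL inB fuel
          else aLoop cs depth (i+1) inS inL inB fuel
        else if c = '\'' then aLoop cs depth (i+1) true inL inB fuel
        else if c = '-' ∧ i + 1 < (cs.length : Int) ∧ PySem.List.pyGet? cs (i+1) = some '-' then
          aLoop cs depth (i+2) inS true inB fuel
        else if c = '/' ∧ i + 1 < (cs.length : Int) ∧ PySem.List.pyGet? cs (i+1) = some '*' then
          aLoop cs depth (i+2) inS inL true fuel
        else if c = '(' then aLoop cs (depth+1) (i+1) inS inL inB fuel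
        else if c = ')' then aLoop cs (depth-1) (i+1) inS inL inB fuel
        else if c = ';' ∧ depth = 0 then i
        else aLoop cs depth (i+1) inS inL inB fuel
    else (cs.length : Int)

def find_statement_end_py (text : String) (start : Int) : Int :=
  aLoop text.toList 0 start false false false
    (((text.toList.length : Int) - start).toNat + 1)

-- ===== PORT B =====
-- hand port of Source B's regex tokenizer (PySem has no regex): one scanner per alternation
-- branch, exact on every input; fuel is again only a totality guard, never exhausted.

-- token '(?:''|[^'])*'?  after the opening quote (unterminated string runs to end of text)
def scanStrB (cs : List Char) (j : Nat) : Nat → Nat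
  | 0 => cs.length
  | fuel+1 =>
    match cs[j]? with
    | none => cs.length
    | some c =>
      if c = '\'' then
        if cs[j+1]? = some '\'' then scanStrB cs (j+2) fuel else j + 1
      else scanStrB cs (j+1) fuel

-- token --[^\n]*\n?  after the '--'
def scanLineB (cs : List Char) (j : Nat) : Nat → Nat
  | 0 => cs.length
  | fuel+1 =>
    match cs[j]? with
    | none => cs.length
    | some c => if c = '\n' then j + 1 else scanLineB cs (j+1) fuel

-- token /\*.*?\*/ (or unterminated /\*.* running to end of text) after the '/*'
def scanBlockB (cs : List Char) (j : Nat) : Nat → Nat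
  | 0 => cs.length
  | fuel+1 =>
    match cs[j]? with
    | none => cs.length
    | some c => if c = '*' ∧ cs[j+1]? = some '/' then j + 2 else scanBlockB cs (j+1) fuel

-- the finditer loop: one step per token, depth on parens, return at a top-level ';'
def bLoop (cs : List Char) (depth : Int) (i : Nat) : Nat → Int
  | 0 => (cs.length : Int)
  | fuel+1 =>
    match cs[i]? with
    | none => (cs.length : Int)
    | some c =>
      if c = '\'' then bLoop cs depth (scanStrB cs (i+1) (cs.length - i)) fuel
      else if c = '-' ∧ cs[i+1]? = some '-' then bLoop cs depth (scanLineB cs (i+2) (cs.length - i)) fuel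
      else if c = '/' ∧ cs[i+1]? = some '*' then bLoop cs depth (scanBlockB cs (i+2) (cs.length - i)) fuel
      else if c = '(' then bLoop cs (depth+1) (i+1) fuel
      else if c = ')' then bLoop cs (depth-1) (i+1) fuel
      else if c = ';' ∧ depth = 0 then (i : Int)
      else bLoop cs depth (i+1) fuel

-- re.finditer clamps a negative start position to 0, which is Int.toNat
def find_statement_end_py_alt (text : String) (start : Int) : Int :=
  bLoop text.toList 0 start.toNat (text.toList.length - start.toNat + 1)

-- ===== PRECONDITION & SPEC =====
-- Pre_ restricts to the natural domain start ≥ 0: for negative start A reads characters by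
-- Python's negative-index wraparound (returning a negative position, or raising IndexError
-- when start < -len(text)), while B's scan starts at 0 — an accident no caller relies on.
def Pre_find_statement_end_py (text : String) (start : Int) : Prop := 0 ≤ start
instance (text : String) (start : Int) : Decidable (Pre_find_statement_end_py text start) := by
  unfold Pre_find_statement_end_py; infer_instance

def pvWitness_find_statement_end_py : String × Int := ("f(1;'a;b')--;\n;", 0)

def Spec_find_statement_end_py (text : String) (start : Int) (out : Int) : Prop := out = find_statement_end_py_alt text start
instance (text : String) (start : Int) (out : Int) : Decidable (Spec_find_statement_end_py text start out) := by unfold Spec_find_statement_end_py; infer_instance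

-- ===== CLAIM (what is proved, stated in full; the proofs are below) =====
def Claim_equal_find_statement_end_py : Prop := ∀ (text : String) (start : Int), Dom_find_statement_end_py text start → Pre_find_statement_end_py text start → Spec_find_statement_end_py text start (find_statement_end_py text start)

-- ===== LEMMAS AND PROOFS =====

-- Fuel-free, well-founded proof-local versions of the two loops and the three scanners;
-- each fuelled port function is shown to agree with its fuel-free version whenever the
-- fuel covers the remaining text, and the two fuel-free loops are then proved equal.

def scanStrN (cs : List Char) (j : Nat) : Nat :=
  match _h : cs[j]? with
  | none => cs.length
  | some c =>
    if c = '\'' then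
      if cs[j+1]? = some '\'' then scanStrN cs (j+2) else j + 1
    else scanStrN cs (j+1)
termination_by cs.length - j
decreasing_by all_goals (obtain ⟨h, -⟩ := List.getElem?_eq_some_iff.mp _h; omega)

def scanLineN (cs : List Char) (j : Nat) : Nat :=
  match _h : cs[j]? with
  | none => cs.length
  | some c => if c = '\n' then j + 1 else scanLineN cs (j+1)
termination_by cs.length - j
decreasing_by obtain ⟨h, -⟩ := List.getElem?_eq_some_iff.mp _h; omega

def scanBlockN (cs : List Char) (j : Nat) : Nat :=
  match _h : cs[j]? with
  | none => cs.length
  | some c => if c = '*' ∧ cs[j+1]? = some '/' then j + 2 else scanBlockN cs (j+1)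
termination_by cs.length - j
decreasing_by obtain ⟨h, -⟩ := List.getElem?_eq_some_iff.mp _h; omega

theorem le_scanStrN (cs : List Char) (j : Nat) : min j cs.length ≤ scanStrN cs j := by
  fun_induction scanStrN with
  | case1 j h => omega
  | case2 j h1 h2 ih =>
      have := (List.getElem?_eq_some_iff.mp h1).1
      have := (List.getElem?_eq_some_iff.mp h2).1
      omega
  | case3 j h1 h2 => omega
  | case4 j c h hne ih => have := (List.getElem?_eq_some_iff.mp h).1; omega

theorem le_scanLineN (cs : List Char) (j : Nat) : min j cs.length ≤ scanLineN cs j := by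
  fun_induction scanLineN with
  | case1 j h => omega
  | case2 j h => omega
  | case3 j c h hne ih => have := (List.getElem?_eq_some_iff.mp h).1; omega

theorem le_scanBlockN (cs : List Char) (j : Nat) : min j cs.length ≤ scanBlockN cs j := by
  fun_induction scanBlockN with
  | case1 j h => omega
  | case2 j c h => omega
  | case3 j c h hg ih => have := (List.getElem?_eq_some_iff.mp h).1; omega

def bLoopN (cs : List Char) (depth : Int) (i : Nat) : Int :=
  match _h : cs[i]? with
  | none => (cs.length : Int)
  | some c =>
    if c = '\'' then bLoopN cs depth (scanStrN cs (i+1))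
    else if c = '-' ∧ cs[i+1]? = some '-' then bLoopN cs depth (scanLineN cs (i+2))
    else if c = '/' ∧ cs[i+1]? = some '*' then bLoopN cs depth (scanBlockN cs (i+2))
    else if c = '(' then bLoopN cs (depth+1) (i+1)
    else if c = ')' then bLoopN cs (depth-1) (i+1)
    else if c = ';' ∧ depth = 0 then (i : Int)
    else bLoopN cs depth (i+1)
termination_by cs.length - i
decreasing_by
  all_goals obtain ⟨h, -⟩ := List.getElem?_eq_some_iff.mp _h
  · have := le_scanStrN cs (i+1); omega
  · have := le_scanLineN cs (i+2); omega
  · have := le_scanBlockN cs (i+2); omega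
  all_goals omega

-- Nat-indexed mirror of aLoop (proof-local): same branches, with the Int index and the
-- pyGet?/bounds conditions replaced by their getElem? equivalents.
def aLoopN (cs : List Char) (depth : Int) (j : Nat) (inS inL inB : Bool) : Int :=
  match _h : cs[j]? with
  | none => (cs.length : Int)
  | some c =>
    if inL then
      if c = '\n' then aLoopN cs depth (j+1) inS false inB
      else aLoopN cs depth (j+1) inS inL inB
    else if inB then
      if c = '*' ∧ cs[j+1]? = some '/' then aLoopN cs depth (j+2) inS inL false
      else aLoopN cs depth (j+1) inS inL inB
    else if inS then
      if c = '\'' ∧ cs[j+1]? ≠ some '\'' then aLoopN cs depth (j+1) false inL inB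
      else if c = '\'' ∧ cs[j+1]? = some '\'' then aLoopN cs depth (j+2) inS inL inB
      else aLoopN cs depth (j+1) inS inL inB
    else if c = '\'' then aLoopN cs depth (j+1) true inL inB
    else if c = '-' ∧ cs[j+1]? = some '-' then aLoopN cs depth (j+2) inS true inB
    else if c = '/' ∧ cs[j+1]? = some '*' then aLoopN cs depth (j+2) inS inL true
    else if c = '(' then aLoopN cs (depth+1) (j+1) inS inL inB
    else if c = ')' then aLoopN cs (depth-1) (j+1) inS inL inB
    else if c = ';' ∧ depth = 0 then (j : Int)
    else aLoopN cs depth (j+1) inS inL inB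
termination_by cs.length - j
decreasing_by all_goals (obtain ⟨h, -⟩ := List.getElem?_eq_some_iff.mp _h; omega)

theorem cond_and_iff (cs : List Char) (j : Nat) (c' : Char) :
    (j < cs.length ∧ cs[j]? = some c') ↔ cs[j]? = some c' :=
  ⟨And.right, fun h => ⟨(List.getElem?_eq_some_iff.mp h).1, h⟩⟩

theorem cond_or_iff (cs : List Char) (j : Nat) (c' : Char) :
    (¬ j < cs.length ∨ cs[j]? ≠ some c') ↔ cs[j]? ≠ some c' := by
  constructor
  · rintro (hb | hne)
    · have h0 : cs[j]? = none := List.getElem?_eq_none_iff.mpr (Nat.le_of_not_lt hb)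
      simp [h0]
    · exact hne
  · exact Or.inr

theorem aLoopN_none (cs : List Char) (depth : Int) (j : Nat) (inS inL inB : Bool)
    (h : cs[j]? = none) : aLoopN cs depth j inS inL inB = (cs.length : Int) := by
  rw [aLoopN]; split <;> simp_all

theorem aLoopN_some (cs : List Char) (depth : Int) (j : Nat) (c : Char) (inS inL inB : Bool)
    (h : cs[j]? = some c) :
    aLoopN cs depth j inS inL inB =
      (if inL then
        if c = '\n' then aLoopN cs depth (j+1) inS false inB
        else aLoopN cs depth (j+1) inS inL inB
      else if inB then
        if c = '*' ∧ cs[j+1]? = some '/' then aLoopN cs depth (j+2) inS inL false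
        else aLoopN cs depth (j+1) inS inL inB
      else if inS then
        if c = '\'' ∧ cs[j+1]? ≠ some '\'' then aLoopN cs depth (j+1) false inL inB
        else if c = '\'' ∧ cs[j+1]? = some '\'' then aLoopN cs depth (j+2) inS inL inB
        else aLoopN cs depth (j+1) inS inL inB
      else if c = '\'' then aLoopN cs depth (j+1) true inL inB
      else if c = '-' ∧ cs[j+1]? = some '-' then aLoopN cs depth (j+2) inS true inB
      else if c = '/' ∧ cs[j+1]? = some '*' then aLoopN cs depth (j+2) inS inL true
      else if c = '(' then aLoopN cs (depth+1) (j+1) inS inL inB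
      else if c = ')' then aLoopN cs (depth-1) (j+1) inS inL inB
      else if c = ';' ∧ depth = 0 then (j : Int)
      else aLoopN cs depth (j+1) inS inL inB) := by
  rw [aLoopN]; split <;> simp_all

theorem scanStrN_none (cs : List Char) (j : Nat) (h : cs[j]? = none) :
    scanStrN cs j = cs.length := by
  rw [scanStrN]; split <;> simp_all

theorem scanStrN_some (cs : List Char) (j : Nat) (c : Char) (h : cs[j]? = some c) :
    scanStrN cs j =
      if c = '\'' then (if cs[j+1]? = some '\'' then scanStrN cs (j+2) else j + 1)
      else scanStrN cs (j+1) := by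
  rw [scanStrN]; split <;> simp_all

theorem scanLineN_none (cs : List Char) (j : Nat) (h : cs[j]? = none) :
    scanLineN cs j = cs.length := by
  rw [scanLineN]; split <;> simp_all

theorem scanLineN_some (cs : List Char) (j : Nat) (c : Char) (h : cs[j]? = some c) :
    scanLineN cs j = if c = '\n' then j + 1 else scanLineN cs (j+1) := by
  rw [scanLineN]; split <;> simp_all

theorem scanBlockN_none (cs : List Char) (j : Nat) (h : cs[j]? = none) :
    scanBlockN cs j = cs.length := by
  rw [scanBlockN]; split <;> simp_all

theorem scanBlockN_some (cs : List Char) (j : Nat) (c : Char) (h : cs[j]? = some c) :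
    scanBlockN cs j =
      if c = '*' ∧ cs[j+1]? = some '/' then j + 2 else scanBlockN cs (j+1) := by
  rw [scanBlockN]; split <;> simp_all

theorem bLoopN_none (cs : List Char) (depth : Int) (j : Nat) (h : cs[j]? = none) :
    bLoopN cs depth j = (cs.length : Int) := by
  rw [bLoopN]; split <;> simp_all

theorem bLoopN_some (cs : List Char) (depth : Int) (j : Nat) (c : Char) (h : cs[j]? = some c) :
    bLoopN cs depth j =
      (if c = '\'' then bLoopN cs depth (scanStrN cs (j+1))
      else if c = '-' ∧ cs[j+1]? = some '-' then bLoopN cs depth (scanLineN cs (j+2))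
      else if c = '/' ∧ cs[j+1]? = some '*' then bLoopN cs depth (scanBlockN cs (j+2))
      else if c = '(' then bLoopN cs (depth+1) (j+1)
      else if c = ')' then bLoopN cs (depth-1) (j+1)
      else if c = ';' ∧ depth = 0 then (j : Int)
      else bLoopN cs depth (j+1)) := by
  rw [bLoopN]; split <;> simp_all

-- one-step equations of the fuelled port functions at positive fuel
theorem aLoopF_none (cs : List Char) (depth : Int) (j : Nat) (inS inL inB : Bool) (fuel : Nat)
    (h : cs.length ≤ j) : aLoop cs depth (j : Int) inS inL inB (fuel+1) = (cs.length : Int) := by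
  rw [aLoop, if_neg (by exact_mod_cast Nat.not_lt.mpr h)]

theorem scanStrBF_none (cs : List Char) (j : Nat) (fuel : Nat) (h : cs[j]? = none) :
    scanStrB cs j (fuel+1) = cs.length := by
  rw [scanStrB]; split <;> simp_all

theorem scanStrBF_some (cs : List Char) (j : Nat) (c : Char) (fuel : Nat) (h : cs[j]? = some c) :
    scanStrB cs j (fuel+1) =
      if c = '\'' then (if cs[j+1]? = some '\'' then scanStrB cs (j+2) fuel else j + 1)
      else scanStrB cs (j+1) fuel := by
  rw [scanStrB]; split <;> simp_all

theorem scanLineBF_none (cs : List Char) (j : Nat) (fuel : Nat) (h : cs[j]? = none) :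
    scanLineB cs j (fuel+1) = cs.length := by
  rw [scanLineB]; split <;> simp_all

theorem scanLineBF_some (cs : List Char) (j : Nat) (c : Char) (fuel : Nat) (h : cs[j]? = some c) :
    scanLineB cs j (fuel+1) = if c = '\n' then j + 1 else scanLineB cs (j+1) fuel := by
  rw [scanLineB]; split <;> simp_all

theorem scanBlockBF_none (cs : List Char) (j : Nat) (fuel : Nat) (h : cs[j]? = none) :
    scanBlockB cs j (fuel+1) = cs.length := by
  rw [scanBlockB]; split <;> simp_all

theorem scanBlockBF_some (cs : List Char) (j : Nat) (c : Char) (fuel : Nat) (h : cs[j]? = some c) :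
    scanBlockB cs j (fuel+1) =
      if c = '*' ∧ cs[j+1]? = some '/' then j + 2 else scanBlockB cs (j+1) fuel := by
  rw [scanBlockB]; split <;> simp_all

theorem bLoopF_none (cs : List Char) (depth : Int) (j : Nat) (fuel : Nat) (h : cs[j]? = none) :
    bLoop cs depth j (fuel+1) = (cs.length : Int) := by
  rw [bLoop]; split <;> simp_all

theorem bLoopF_some (cs : List Char) (depth : Int) (j : Nat) (c : Char) (fuel : Nat)
    (h : cs[j]? = some c) :
    bLoop cs depth j (fuel+1) =
      (if c = '\'' then bLoop cs depth (scanStrB cs (j+1) (cs.length - j)) fuel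
      else if c = '-' ∧ cs[j+1]? = some '-' then bLoop cs depth (scanLineB cs (j+2) (cs.length - j)) fuel
      else if c = '/' ∧ cs[j+1]? = some '*' then bLoop cs depth (scanBlockB cs (j+2) (cs.length - j)) fuel
      else if c = '(' then bLoop cs (depth+1) (j+1) fuel
      else if c = ')' then bLoop cs (depth-1) (j+1) fuel
      else if c = ';' ∧ depth = 0 then (j : Int)
      else bLoop cs depth (j+1) fuel) := by
  rw [bLoop]; split <;> simp_all

-- the fuelled port of A computes aLoopN whenever the fuel covers the remaining text
theorem aLoop_suff (cs : List Char) :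
    ∀ fuel j depth inS inL inB, cs.length ≤ j + fuel →
      aLoop cs depth (j : Int) inS inL inB fuel = aLoopN cs depth j inS inL inB := by
  intro fuel
  induction fuel with
  | zero =>
    intro j depth inS inL inB hm
    rw [aLoop, aLoopN_none cs depth j inS inL inB (List.getElem?_eq_none_iff.mpr (by omega))]
  | succ fuel ih =>
    intro j depth inS inL inB hm
    by_cases hj : j < cs.length
    · have hc : cs[j]? = some (cs[j]'hj) := List.getElem?_eq_some_iff.mpr ⟨hj, rfl⟩
      have hpg : PySem.List.pyGet? cs (j : Int) = some (cs[j]'hj) := by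
        rw [PySem.List.pyGet?_natCast]; exact hc
      have e1 : ((j : Int)) + 1 = ((j+1 : Nat) : Int) := by push_cast; ring
      have e2 : ((j : Int)) + 2 = ((j+2 : Nat) : Int) := by push_cast; ring
      rw [aLoop, if_pos (by exact_mod_cast hj), hpg,
        aLoopN_some cs depth j (cs[j]'hj) inS inL inB hc]
      simp only []
      simp only [e1, e2, PySem.List.pyGet?_natCast, Nat.cast_lt, cond_and_iff, cond_or_iff]
      split_ifs <;> first | rfl | (exact ih _ _ _ _ _ (by omega))
    · rw [aLoopF_none cs depth j inS inL inB fuel (by omega),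
        aLoopN_none cs depth j inS inL inB (List.getElem?_eq_none_iff.mpr (by omega))]

-- each fuelled scanner computes its fuel-free version under sufficient fuel
theorem scanStrB_suff (cs : List Char) :
    ∀ fuel j, cs.length ≤ j + fuel → scanStrB cs j fuel = scanStrN cs j := by
  intro fuel
  induction fuel with
  | zero =>
    intro j hm
    rw [scanStrB, scanStrN_none cs j (List.getElem?_eq_none_iff.mpr (by omega))]
  | succ fuel ih =>
    intro j hm
    by_cases hj : j < cs.length
    · have hc : cs[j]? = some (cs[j]'hj) := List.getElem?_eq_some_iff.mpr ⟨hj, rfl⟩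
      rw [scanStrBF_some cs j (cs[j]'hj) fuel hc, scanStrN_some cs j (cs[j]'hj) hc]
      split_ifs
      · exact ih (j+2) (by omega)
      · rfl
      · exact ih (j+1) (by omega)
    · have h0 : cs[j]? = none := List.getElem?_eq_none_iff.mpr (by omega)
      rw [scanStrBF_none cs j fuel h0, scanStrN_none cs j h0]

theorem scanLineB_suff (cs : List Char) :
    ∀ fuel j, cs.length ≤ j + fuel → scanLineB cs j fuel = scanLineN cs j := by
  intro fuel
  induction fuel with
  | zero =>
    intro j hm
    rw [scanLineB, scanLineN_none cs j (List.getElem?_eq_none_iff.mpr (by omega))]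
  | succ fuel ih =>
    intro j hm
    by_cases hj : j < cs.length
    · have hc : cs[j]? = some (cs[j]'hj) := List.getElem?_eq_some_iff.mpr ⟨hj, rfl⟩
      rw [scanLineBF_some cs j (cs[j]'hj) fuel hc, scanLineN_some cs j (cs[j]'hj) hc]
      split_ifs
      · rfl
      · exact ih (j+1) (by omega)
    · have h0 : cs[j]? = none := List.getElem?_eq_none_iff.mpr (by omega)
      rw [scanLineBF_none cs j fuel h0, scanLineN_none cs j h0]

theorem scanBlockB_suff (cs : List Char) :
    ∀ fuel j, cs.length ≤ j + fuel → scanBlockB cs j fuel = scanBlockN cs j := by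
  intro fuel
  induction fuel with
  | zero =>
    intro j hm
    rw [scanBlockB, scanBlockN_none cs j (List.getElem?_eq_none_iff.mpr (by omega))]
  | succ fuel ih =>
    intro j hm
    by_cases hj : j < cs.length
    · have hc : cs[j]? = some (cs[j]'hj) := List.getElem?_eq_some_iff.mpr ⟨hj, rfl⟩
      rw [scanBlockBF_some cs j (cs[j]'hj) fuel hc, scanBlockN_some cs j (cs[j]'hj) hc]
      split_ifs
      · rfl
      · exact ih (j+1) (by omega)
    · have h0 : cs[j]? = none := List.getElem?_eq_none_iff.mpr (by omega)
      rw [scanBlockBF_none cs j fuel h0, scanBlockN_none cs j h0]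

-- the fuelled port of B computes bLoopN whenever the fuel covers the remaining text
theorem bLoop_suff (cs : List Char) :
    ∀ fuel j depth, cs.length ≤ j + fuel →
      bLoop cs depth j fuel = bLoopN cs depth j := by
  intro fuel
  induction fuel with
  | zero =>
    intro j depth hm
    rw [bLoop, bLoopN_none cs depth j (List.getElem?_eq_none_iff.mpr (by omega))]
  | succ fuel ih =>
    intro j depth hm
    by_cases hj : j < cs.length
    · have hc : cs[j]? = some (cs[j]'hj) := List.getElem?_eq_some_iff.mpr ⟨hj, rfl⟩
      rw [bLoopF_some cs depth j (cs[j]'hj) fuel hc, bLoopN_some cs depth j (cs[j]'hj) hc]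
      split_ifs
      · rw [scanStrB_suff cs (cs.length - j) (j+1) (by omega)]
        have := le_scanStrN cs (j+1)
        exact ih _ _ (by omega)
      · rw [scanLineB_suff cs (cs.length - j) (j+2) (by omega)]
        have := le_scanLineN cs (j+2)
        exact ih _ _ (by omega)
      · rw [scanBlockB_suff cs (cs.length - j) (j+2) (by omega)]
        have := le_scanBlockN cs (j+2)
        exact ih _ _ (by omega)
      · exact ih _ _ (by omega)
      · exact ih _ _ (by omega)
      · rfl
      · exact ih _ _ (by omega)
    · have h0 : cs[j]? = none := List.getElem?_eq_none_iff.mpr (by omega)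
      rw [bLoopF_none cs depth j fuel h0, bLoopN_none cs depth j h0]

theorem aLoopN_single (cs : List Char) :
    ∀ m j depth, cs.length - j ≤ m →
      aLoopN cs depth j true false false
        = aLoopN cs depth (scanStrN cs j) false false false := by
  intro m
  induction m with
  | zero =>
    intro j depth hm
    have h0 : cs[j]? = none := List.getElem?_eq_none_iff.mpr (by omega)
    rw [aLoopN_none cs depth j true false false h0, scanStrN_none cs j h0,
      aLoopN_none cs depth cs.length false false false
        (List.getElem?_eq_none_iff.mpr (le_refl _))]
  | succ m ih =>
    intro j depth hm
    by_cases hj : j < cs.length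
    · have hc : cs[j]? = some (cs[j]'hj) := List.getElem?_eq_some_iff.mpr ⟨hj, rfl⟩
      rw [aLoopN_some cs depth j (cs[j]'hj) true false false hc, scanStrN_some cs j (cs[j]'hj) hc]
      by_cases hq : cs[j]'hj = '\''
      · by_cases hd : cs[j+1]? = some '\''
        · simp only [hq, hd]
          simp
          exact ih (j+2) depth (by omega)
        · simp [hq, hd]
      · simp [hq]
        exact ih (j+1) depth (by omega)
    · have h0 : cs[j]? = none := List.getElem?_eq_none_iff.mpr (by omega)
      rw [aLoopN_none cs depth j true false false h0, scanStrN_none cs j h0,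
        aLoopN_none cs depth cs.length false false false
          (List.getElem?_eq_none_iff.mpr (le_refl _))]

theorem aLoopN_line (cs : List Char) :
    ∀ m j depth, cs.length - j ≤ m →
      aLoopN cs depth j false true false
        = aLoopN cs depth (scanLineN cs j) false false false := by
  intro m
  induction m with
  | zero =>
    intro j depth hm
    have h0 : cs[j]? = none := List.getElem?_eq_none_iff.mpr (by omega)
    rw [aLoopN_none cs depth j false true false h0, scanLineN_none cs j h0,
      aLoopN_none cs depth cs.length false false false
        (List.getElem?_eq_none_iff.mpr (le_refl _))]
  | succ m ih =>
    intro j depth hm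
    by_cases hj : j < cs.length
    · have hc : cs[j]? = some (cs[j]'hj) := List.getElem?_eq_some_iff.mpr ⟨hj, rfl⟩
      rw [aLoopN_some cs depth j (cs[j]'hj) false true false hc, scanLineN_some cs j (cs[j]'hj) hc]
      by_cases hnl : cs[j]'hj = '\n'
      · simp [hnl]
      · simp [hnl]
        exact ih (j+1) depth (by omega)
    · have h0 : cs[j]? = none := List.getElem?_eq_none_iff.mpr (by omega)
      rw [aLoopN_none cs depth j false true false h0, scanLineN_none cs j h0,
        aLoopN_none cs depth cs.length false false false
          (List.getElem?_eq_none_iff.mpr (le_refl _))]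

theorem aLoopN_block (cs : List Char) :
    ∀ m j depth, cs.length - j ≤ m →
      aLoopN cs depth j false false true
        = aLoopN cs depth (scanBlockN cs j) false false false := by
  intro m
  induction m with
  | zero =>
    intro j depth hm
    have h0 : cs[j]? = none := List.getElem?_eq_none_iff.mpr (by omega)
    rw [aLoopN_none cs depth j false false true h0, scanBlockN_none cs j h0,
      aLoopN_none cs depth cs.length false false false
        (List.getElem?_eq_none_iff.mpr (le_refl _))]
  | succ m ih =>
    intro j depth hm
    by_cases hj : j < cs.length
    · have hc : cs[j]? = some (cs[j]'hj) := List.getElem?_eq_some_iff.mpr ⟨hj, rfl⟩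
      rw [aLoopN_some cs depth j (cs[j]'hj) false false true hc, scanBlockN_some cs j (cs[j]'hj) hc]
      by_cases hg : cs[j]'hj = '*' ∧ cs[j+1]? = some '/'
      · simp [hg]
      · simp [hg]
        exact ih (j+1) depth (by omega)
    · have h0 : cs[j]? = none := List.getElem?_eq_none_iff.mpr (by omega)
      rw [aLoopN_none cs depth j false false true h0, scanBlockN_none cs j h0,
        aLoopN_none cs depth cs.length false false false
          (List.getElem?_eq_none_iff.mpr (le_refl _))]

theorem aLoopN_eq_bLoopN (cs : List Char) :
    ∀ m j depth, cs.length - j ≤ m →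
      aLoopN cs depth j false false false = bLoopN cs depth j := by
  intro m
  induction m with
  | zero =>
    intro j depth hm
    have h0 : cs[j]? = none := List.getElem?_eq_none_iff.mpr (by omega)
    rw [aLoopN_none cs depth j false false false h0, bLoopN_none cs depth j h0]
  | succ m ih =>
    intro j depth hm
    by_cases hj : j < cs.length
    · have hc : cs[j]? = some (cs[j]'hj) := List.getElem?_eq_some_iff.mpr ⟨hj, rfl⟩
      rw [aLoopN_some cs depth j (cs[j]'hj) false false false hc, bLoopN_some cs depth j (cs[j]'hj) hc]
      simp only [Bool.false_eq_true, if_false]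
      split_ifs with h1 h2 h3 h4 h5 h6
      · rw [aLoopN_single cs cs.length (j+1) depth (Nat.sub_le _ _)]
        have := le_scanStrN cs (j+1)
        exact ih _ _ (by omega)
      · rw [aLoopN_line cs cs.length (j+2) depth (Nat.sub_le _ _)]
        have := le_scanLineN cs (j+2)
        exact ih _ _ (by omega)
      · rw [aLoopN_block cs cs.length (j+2) depth (Nat.sub_le _ _)]
        have := le_scanBlockN cs (j+2)
        exact ih _ _ (by omega)
      · exact ih _ _ (by omega)
      · exact ih _ _ (by omega)
      · rfl
      · exact ih _ _ (by omega)
    · have h0 : cs[j]? = none := List.getElem?_eq_none_iff.mpr (by omega)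
      rw [aLoopN_none cs depth j false false false h0, bLoopN_none cs depth j h0]

-- ===== VERDICT (by name: the statement is the Claim_ definition above) =====
theorem find_statement_end_py_spec : Claim_equal_find_statement_end_py := by
  intro text start _ hpre
  unfold Spec_find_statement_end_py find_statement_end_py find_statement_end_py_alt
  have h : start = ((start.toNat : Nat) : Int) := (Int.toNat_of_nonneg hpre).symm
  rw [h, aLoop_suff text.toList _ start.toNat 0 false false false (by omega)]
  simp only [Int.toNat_natCast]
  rw [bLoop_suff text.toList _ start.toNat 0 (by omega)]
  exact aLoopN_eq_bLoopN text.toList (text.toList.length) start.toNat 0 (Nat.sub_le _ _)
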